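-- pv_equiv track=rewrite | github.com/Nurali017/patents_trials | trials_app/services/reports.py | _resolve_status
-- ===== SOURCE A (Python) =====
-- CONTINUED_STATUSES = {'in_trial', 'planned'}
--
-- REMOVED_STATUSES = {'removed'}
--
-- def _resolve_status(oblast_statuses):
--     """
--     Resolve application status from all oblast states.
--     Priority: approved > continued > removed.
--     Withdrawn excluded.
--     """
--     statuses = {s for s in oblast_statuses if s != 'withdrawn'}
--     if not statuses:
--         return None
--
--     if 'approved' in statuses:
--         return 'approved'
--
--     if statuses & CONTINUED_STATUSES:
--         return 'continued'
--
--     if statuses & REMOVED_STATUSES: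
--         return 'removed'
--
--     return None
-- ===== SOURCE B (Python) =====
-- DECODE = {3: 'approved', 2: 'continued', 1: 'removed'}
--
-- def _rank(s):
--     """Numeric priority rank of a single (non-withdrawn) status."""
--     if s == 'approved':
--         return 3
--     if s in ('in_trial', 'planned'):
--         return 2
--     if s == 'removed':
--         return 1
--     return 0
--
-- def _resolve_status(oblast_statuses):
--     """Max-of-ranks reduction: encode each non-withdrawn status as a numeric
--     priority rank, take the maximum, and decode it back (missing rank -> None)."""
--     best = -1
--     for s in oblast_statuses:
--         if s != 'withdrawn':
--             best = max(best, _rank(s))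
--     return DECODE.get(best)
-- ===== Notes on version B (the rewrite author's own statement) =====
-- stated objective: alternative
-- what changed: Replaces the filtered set plus the priority if-chain of membership/intersection tests by a numeric-rank encoding: each non-withdrawn status is mapped to a priority rank, a single max-reduction picks the highest rank, and an int-keyed decode table turns it back into the result (no result branches at all).
import Mathlib
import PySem

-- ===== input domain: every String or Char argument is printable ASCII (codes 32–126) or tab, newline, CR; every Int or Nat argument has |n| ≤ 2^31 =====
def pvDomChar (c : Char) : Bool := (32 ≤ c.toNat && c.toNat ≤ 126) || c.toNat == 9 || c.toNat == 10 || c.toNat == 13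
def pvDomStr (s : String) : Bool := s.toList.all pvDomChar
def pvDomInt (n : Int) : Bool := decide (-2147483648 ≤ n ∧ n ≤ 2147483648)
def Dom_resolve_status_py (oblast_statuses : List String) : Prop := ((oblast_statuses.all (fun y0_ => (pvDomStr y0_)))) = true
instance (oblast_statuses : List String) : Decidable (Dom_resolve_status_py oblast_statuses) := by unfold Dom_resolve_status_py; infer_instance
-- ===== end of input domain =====

-- B replaces A's filtered set + priority if-chain by a numeric-rank encoding:
-- map statuses to ranks, take the max, decode it back (objective: alternative).

-- ===== PORT A =====
def pvContinuedStatuses : PySem.Set String := PySem.Set.ofList ["in_trial", "planned"]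
def pvRemovedStatuses : PySem.Set String := PySem.Set.ofList ["removed"]

def resolve_status_py (oblast_statuses : List String) : Option String :=
  let statuses : PySem.Set String :=
    PySem.Set.ofList (oblast_statuses.filter (fun s => s ≠ "withdrawn"))
  if statuses = [] then none
  else if PySem.Set.contains statuses "approved" then some "approved"
  else if PySem.Set.inter statuses pvContinuedStatuses ≠ [] then some "continued"
  else if PySem.Set.inter statuses pvRemovedStatuses ≠ [] then some "removed"
  else none

-- ===== PORT B =====
def pvDecode : PySem.Dict Int String :=
  PySem.Dict.ofList [(3, "approved"), (2, "continued"), (1, "removed")]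

def pvRankFn (s : String) : Int :=
  if s = "approved" then 3
  else if s = "in_trial" ∨ s = "planned" then 2
  else if s = "removed" then 1
  else 0

def resolve_status_py_alt (oblast_statuses : List String) : Option String :=
  let best : Int := oblast_statuses.foldl
    (fun b s => if s ≠ "withdrawn" then max b (pvRankFn s) else b) (-1)
  PySem.Dict.get? pvDecode best

-- ===== PRECONDITION & SPEC =====
def Spec_resolve_status_py (oblast_statuses : List String) (out : Option String) : Prop := out = resolve_status_py_alt oblast_statuses
instance (oblast_statuses : List String) (out : Option String) : Decidable (Spec_resolve_status_py oblast_statuses out) := by unfold Spec_resolve_status_py; infer_instance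

-- ===== CLAIM (what is proved, stated in full; the proofs are below) =====
def Claim_equal_resolve_status_py : Prop := ∀ (oblast_statuses : List String), Dom_resolve_status_py oblast_statuses → Spec_resolve_status_py oblast_statuses (resolve_status_py oblast_statuses)

-- ===== LEMMAS AND PROOFS =====

-- rank facts (all propositional: no kernel string evaluation)
theorem pvRank_le_3 (s : String) : pvRankFn s ≤ 3 := by
  unfold pvRankFn; split_ifs <;> omega

theorem pvRank_nonneg (s : String) : 0 ≤ pvRankFn s := by
  unfold pvRankFn; split_ifs <;> omega

theorem pvRank_le_2 (s : String) (h : s ≠ "approved") : pvRankFn s ≤ 2 := by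
  unfold pvRankFn; rw [if_neg h]; split_ifs <;> omega

theorem pvRank_le_1 (s : String) (h1 : s ≠ "approved")
    (h2 : ¬(s = "in_trial" ∨ s = "planned")) : pvRankFn s ≤ 1 := by
  unfold pvRankFn; rw [if_neg h1, if_neg h2]; split_ifs <;> omega

theorem pvRank_le_0 (s : String) (h1 : s ≠ "approved")
    (h2 : ¬(s = "in_trial" ∨ s = "planned")) (h3 : s ≠ "removed") : pvRankFn s ≤ 0 := by
  unfold pvRankFn; rw [if_neg h1, if_neg h2, if_neg h3]

theorem pvRank_approved : pvRankFn "approved" = 3 := by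
  unfold pvRankFn; rw [if_pos rfl]

theorem pvRank_continued (s : String) (h : s = "in_trial" ∨ s = "planned") :
    pvRankFn s = 2 := by
  have hne : s ≠ "approved" := by rcases h with rfl | rfl <;> simp
  unfold pvRankFn; rw [if_neg hne, if_pos h]

theorem pvRank_removed : pvRankFn "removed" = 1 := by
  unfold pvRankFn; rw [if_neg (by simp), if_neg (by simp), if_pos rfl]

-- decode facts
theorem pvDecode_mk : pvDecode = PySem.Dict.mk [(3, "approved"), (2, "continued"), (1, "removed")] := by rfl

theorem pvDecode_3 : PySem.Dict.get? pvDecode 3 = some "approved" := by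
  rw [pvDecode_mk]; simp [PySem.Dict.get?_mk_cons]

theorem pvDecode_2 : PySem.Dict.get? pvDecode 2 = some "continued" := by
  rw [pvDecode_mk]; simp [PySem.Dict.get?_mk_cons]

theorem pvDecode_1 : PySem.Dict.get? pvDecode 1 = some "removed" := by
  rw [pvDecode_mk]; simp [PySem.Dict.get?_mk_cons]

theorem pvDecode_0 : PySem.Dict.get? pvDecode 0 = none := by
  rw [pvDecode_mk]; simp [PySem.Dict.get?]

theorem pvDecode_neg1 : PySem.Dict.get? pvDecode (-1) = none := by
  rw [pvDecode_mk]; simp [PySem.Dict.get?]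

-- fold facts: the running maximum only grows, is bounded by any bound on the ranks,
-- dominates the rank of every non-withdrawn element, and ignores withdrawn elements
theorem pvFold_ge (xs : List String) (b : Int) :
    b ≤ xs.foldl (fun b s => if s ≠ "withdrawn" then max b (pvRankFn s) else b) b := by
  induction xs generalizing b with
  | nil => simp
  | cons x xs ih =>
    simp only [List.foldl_cons]
    by_cases hw : x = "withdrawn"
    · rw [if_neg (by simp [hw])]; exact ih b
    · rw [if_pos (by simp [hw])]
      exact le_trans (le_max_left _ _) (ih _)

theorem pvFold_le (xs : List String) (b c : Int) (hb : b ≤ c)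
    (h : ∀ s ∈ xs, s ≠ "withdrawn" → pvRankFn s ≤ c) :
    xs.foldl (fun b s => if s ≠ "withdrawn" then max b (pvRankFn s) else b) b ≤ c := by
  induction xs generalizing b with
  | nil => simpa using hb
  | cons x xs ih =>
    simp only [List.foldl_cons]
    by_cases hw : x = "withdrawn"
    · rw [if_neg (by simp [hw])]
      exact ih b hb (fun s hs => h s (List.mem_cons_of_mem _ hs))
    · rw [if_pos (by simp [hw])]
      exact ih _ (max_le hb (h x (List.mem_cons_self) hw))
        (fun s hs => h s (List.mem_cons_of_mem _ hs))

theorem pvFold_mem (xs : List String) (b : Int) (s : String) (hs : s ∈ xs)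
    (hw : s ≠ "withdrawn") :
    pvRankFn s ≤ xs.foldl (fun b s => if s ≠ "withdrawn" then max b (pvRankFn s) else b) b := by
  induction xs generalizing b with
  | nil => cases hs
  | cons x xs ih =>
    simp only [List.foldl_cons]
    rcases List.mem_cons.mp hs with rfl | hs'
    · rw [if_pos (by simp [hw])]
      exact le_trans (le_max_right _ _) (pvFold_ge xs _)
    · by_cases hxw : x = "withdrawn"
      · rw [if_neg (by simp [hxw])]; exact ih b hs'
      · rw [if_pos (by simp [hxw])]; exact ih _ hs' 

theorem pvFold_withdrawn (xs : List String) (b : Int) (h : ∀ s ∈ xs, s = "withdrawn") :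
    xs.foldl (fun b s => if s ≠ "withdrawn" then max b (pvRankFn s) else b) b = b := by
  induction xs generalizing b with
  | nil => simp
  | cons x xs ih =>
    simp only [List.foldl_cons]
    rw [if_neg (by simp [h x List.mem_cons_self])]
    exact ih b (fun s hs => h s (List.mem_cons_of_mem _ hs))

theorem pvOfList_eq_nil {α : Type} [BEq α] [LawfulBEq α] (xs : List α) :
    PySem.Set.ofList xs = [] ↔ xs = [] := by
  cases xs with
  | nil => simp [PySem.Set.ofList_nil]
  | cons x xs =>
    rw [PySem.Set.ofList_cons]
    simp

theorem pvEmptyN (xs : List String) :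
    (PySem.Set.ofList (xs.filter (fun s => s ≠ "withdrawn")) = []) ↔
      (xs.any (fun s => s ≠ "withdrawn") = false) := by
  simp [pvOfList_eq_nil, List.filter_eq_nil_iff, List.any_eq_false]

theorem pvMemA (xs : List String) :
    (PySem.Set.contains (PySem.Set.ofList (xs.filter (fun s => s ≠ "withdrawn"))) "approved" = true) ↔
      (xs.any (fun s => s = "approved") = true) := by
  rw [PySem.Set.contains_iff, PySem.Set.mem_ofList]
  simp [List.mem_filter, List.any_eq_true]

theorem pvInterC (xs : List String) :
    (PySem.Set.inter (PySem.Set.ofList (xs.filter (fun s => s ≠ "withdrawn"))) pvContinuedStatuses ≠ []) ↔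
      (xs.any (fun s => s = "in_trial" ∨ s = "planned") = true) := by
  rw [ne_eq, List.eq_nil_iff_forall_not_mem]
  push_neg
  constructor
  · rintro ⟨v, hv⟩
    rw [PySem.Set.mem_inter, PySem.Set.mem_ofList, List.mem_filter] at hv
    obtain ⟨⟨h1, -⟩, h2⟩ := hv
    have h3 : v = "in_trial" ∨ v = "planned" := by
      simpa [pvContinuedStatuses, PySem.Set.ofList] using h2
    exact List.any_eq_true.mpr ⟨v, h1, by simpa using h3⟩
  · intro h
    obtain ⟨v, hv, hve⟩ := List.any_eq_true.mp h
    have hve' : v = "in_trial" ∨ v = "planned" := by simpa using hve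
    refine ⟨v, ?_⟩
    rw [PySem.Set.mem_inter, PySem.Set.mem_ofList, List.mem_filter]
    refine ⟨⟨hv, ?_⟩, ?_⟩
    · rcases hve' with h | h <;> simp [h]
    · rcases hve' with h | h <;> simp [h, pvContinuedStatuses, PySem.Set.ofList]

theorem pvInterR (xs : List String) :
    (PySem.Set.inter (PySem.Set.ofList (xs.filter (fun s => s ≠ "withdrawn"))) pvRemovedStatuses ≠ []) ↔
      (xs.any (fun s => s = "removed") = true) := by
  rw [ne_eq, List.eq_nil_iff_forall_not_mem]
  push_neg
  constructor
  · rintro ⟨v, hv⟩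
    rw [PySem.Set.mem_inter, PySem.Set.mem_ofList, List.mem_filter] at hv
    obtain ⟨⟨h1, -⟩, h2⟩ := hv
    have h3 : v = "removed" := by simpa [pvRemovedStatuses, PySem.Set.ofList] using h2
    exact List.any_eq_true.mpr ⟨v, h1, by simpa using h3⟩
  · intro h
    obtain ⟨v, hv, hve⟩ := List.any_eq_true.mp h
    have hve' : v = "removed" := by simpa using hve
    refine ⟨v, ?_⟩
    rw [PySem.Set.mem_inter, PySem.Set.mem_ofList, List.mem_filter]
    exact ⟨⟨hv, by simp [hve']⟩, by simp [hve', pvRemovedStatuses, PySem.Set.ofList]⟩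

theorem resolve_status_py_eq_alt (xs : List String) :
    resolve_status_py xs = resolve_status_py_alt xs := by
  unfold resolve_status_py resolve_status_py_alt
  by_cases hN : (xs.any (fun s => s ≠ "withdrawn")) = false
  · -- every element is "withdrawn": A returns none, B's max stays -1
    have hall : ∀ s ∈ xs, s = "withdrawn" := by
      rw [List.any_eq_false] at hN
      intro s hs
      simpa using hN s hs
    rw [if_pos ((pvEmptyN xs).mpr hN), pvFold_withdrawn xs (-1) hall, pvDecode_neg1]
  · rw [if_neg (fun h => hN ((pvEmptyN xs).mp h))]
    by_cases hA : (xs.any (fun s => s = "approved")) = true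
    · -- "approved" present: A returns it, B's max is 3
      obtain ⟨s, hs, hse⟩ := List.any_eq_true.mp hA
      have hse' : s = "approved" := by simpa using hse
      subst hse'
      have hfold : xs.foldl (fun b s => if s ≠ "withdrawn" then max b (pvRankFn s) else b) (-1) = 3 :=
        le_antisymm (pvFold_le xs (-1) 3 (by omega) (fun s _ _ => pvRank_le_3 s))
          (pvRank_approved ▸ pvFold_mem xs (-1) _ hs (by simp))
      rw [if_pos ((pvMemA xs).mpr hA), hfold, pvDecode_3]
    · rw [if_neg (fun h => hA ((pvMemA xs).mp h))]
      have hA' : ∀ s ∈ xs, s ≠ "approved" := by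
        have hAx : (xs.any (fun s => s = "approved")) = false := Bool.eq_false_iff.mpr hA
        rw [List.any_eq_false] at hAx
        intro s hs
        simpa using hAx s hs
      by_cases hC : (xs.any (fun s => s = "in_trial" ∨ s = "planned")) = true
      · -- continued status present (no approved): A returns "continued", B's max is 2
        obtain ⟨s, hs, hse⟩ := List.any_eq_true.mp hC
        have hse' : s = "in_trial" ∨ s = "planned" := by simpa using hse
        have hfold : xs.foldl (fun b s => if s ≠ "withdrawn" then max b (pvRankFn s) else b) (-1) = 2 :=
          le_antisymm (pvFold_le xs (-1) 2 (by omega) (fun s hs _ => pvRank_le_2 s (hA' s hs)))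
            (pvRank_continued s hse' ▸ pvFold_mem xs (-1) s hs
              (by rcases hse' with rfl | rfl <;> simp))
        rw [if_pos ((pvInterC xs).mpr hC), hfold, pvDecode_2]
      · rw [if_neg (fun h => hC ((pvInterC xs).mp h))]
        have hC' : ∀ s ∈ xs, ¬(s = "in_trial" ∨ s = "planned") := by
          have hCx : (xs.any (fun s => s = "in_trial" ∨ s = "planned")) = false := Bool.eq_false_iff.mpr hC
          rw [List.any_eq_false] at hCx
          intro s hs
          simpa using hCx s hs
        by_cases hR : (xs.any (fun s => s = "removed")) = true
        · -- "removed" present (nothing higher): A returns it, B's max is 1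
          obtain ⟨s, hs, hse⟩ := List.any_eq_true.mp hR
          have hse' : s = "removed" := by simpa using hse
          subst hse'
          have hfold : xs.foldl (fun b s => if s ≠ "withdrawn" then max b (pvRankFn s) else b) (-1) = 1 :=
            le_antisymm (pvFold_le xs (-1) 1 (by omega)
                (fun s hs _ => pvRank_le_1 s (hA' s hs) (hC' s hs)))
              (pvRank_removed ▸ pvFold_mem xs (-1) _ hs (by simp))
          rw [if_pos ((pvInterR xs).mpr hR), hfold, pvDecode_1]
        · -- some non-withdrawn element but none of the three: both return none, B's max is 0
          rw [if_neg (fun h => hR ((pvInterR xs).mp h))]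
          have hR' : ∀ s ∈ xs, s ≠ "removed" := by
            have hRx : (xs.any (fun s => s = "removed")) = false := Bool.eq_false_iff.mpr hR
            rw [List.any_eq_false] at hRx
            intro s hs
            simpa using hRx s hs
          replace hN : (xs.any (fun s => s ≠ "withdrawn")) = true := by simpa using hN
          obtain ⟨s, hs, hse⟩ := List.any_eq_true.mp hN
          have hse' : s ≠ "withdrawn" := by simpa using hse
          have hfold : xs.foldl (fun b s => if s ≠ "withdrawn" then max b (pvRankFn s) else b) (-1) = 0 :=
            le_antisymm (pvFold_le xs (-1) 0 (by omega)
                (fun s hs _ => pvRank_le_0 s (hA' s hs) (hC' s hs) (hR' s hs)))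
              (le_trans (pvRank_nonneg s) (pvFold_mem xs (-1) s hs hse'))
          rw [hfold, pvDecode_0]

-- ===== VERDICT (by name: the statement is the Claim_ definition above) =====
theorem resolve_status_py_spec : Claim_equal_resolve_status_py := by
  intro xs _
  exact resolve_status_py_eq_alt xs
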